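-- pv_equiv track=rewrite | github.com/AaronDinesh/COM-490 | final_project/final-project.py | _has_significant_physical_stop_loop
-- ===== SOURCE A (Python) =====
-- def _has_significant_physical_stop_loop(path_segments_list):
--     if not path_segments_list or len(path_segments_list) < 2:
--         return False
--
--     # visited stops
--     visited_stops = [path_segments_list[0][0]]
--     visited_stops.extend(seg[1] for seg in path_segments_list)
--
--     # loop detection algo
--     seen_at_position = {}
--     for i, stop_id in enumerate(visited_stops):
--         if stop_id in seen_at_position:
--             prev_position = seen_at_position[stop_id]
--             if i - prev_position > 1:
--                 for j in range(prev_position + 1, i):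
--                     if visited_stops[j] != stop_id:
--                         return True
--         seen_at_position[stop_id] = i
--     return False
-- ===== SOURCE B (Python) =====
-- def _has_significant_physical_stop_loop(path_segments_list):
--     if len(path_segments_list) < 2:
--         return False
--     visited_stops = [path_segments_list[0][0]] + [seg[1] for seg in path_segments_list]
--     seen = {visited_stops[0]}
--     for prev, cur in zip(visited_stops, visited_stops[1:]):
--         if cur != prev and cur in seen:
--             return True
--         seen.add(cur)
--     return False
-- ===== Notes on version B (the rewrite author's own statement) =====
-- stated objective: simpler
-- what changed: A tracks each stop's most recent index in a dict and rescans the intermediate window on every repeat; B makes a single adjacent-pair scan over visited_stops with a set of already-seen stops, returning True when a stop recurs non-adjacently (cur != prev and cur already seen), with no index bookkeeping and no inner rescan.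
import Mathlib
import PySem

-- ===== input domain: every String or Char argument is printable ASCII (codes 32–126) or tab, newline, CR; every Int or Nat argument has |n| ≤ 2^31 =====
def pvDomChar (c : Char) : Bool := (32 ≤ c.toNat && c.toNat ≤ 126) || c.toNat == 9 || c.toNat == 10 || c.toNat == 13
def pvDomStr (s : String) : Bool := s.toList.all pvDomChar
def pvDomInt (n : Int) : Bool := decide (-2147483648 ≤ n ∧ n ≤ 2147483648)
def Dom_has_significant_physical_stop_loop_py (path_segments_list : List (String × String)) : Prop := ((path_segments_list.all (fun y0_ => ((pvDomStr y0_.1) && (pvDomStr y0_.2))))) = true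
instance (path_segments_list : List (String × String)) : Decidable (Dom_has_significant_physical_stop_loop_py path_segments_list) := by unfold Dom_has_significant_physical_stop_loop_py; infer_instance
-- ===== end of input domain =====

-- B replaces A's last-position dict with inner rescans by a single adjacent-pair scan
-- over a set of already-seen stops (objective: simpler).

-- ===== PORT A =====
-- inner loop: 'for j in range(prev_position + 1, i): if visited_stops[j] != stop_id: return True'
def hsA_inner (visited : List String) (stop : String) (js : List Int) : Bool :=
  js.any (fun j => PySem.List.pyGet? visited j != some stop)

-- 'for i, stop_id in enumerate(visited_stops): …' with early return
def hsA_loop (visited : List String) : List (Int × String) → PySem.Dict String Int → Bool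
  | [], _ => false
  | (i, stop) :: rest, seen =>
    match seen.get? stop with
    | some prev =>
      if decide (i - prev > 1) && hsA_inner visited stop (PySem.List.pyRange (prev + 1) i 1) then
        true
      else
        hsA_loop visited rest (seen.insert stop i)
    | none => hsA_loop visited rest (seen.insert stop i)

def has_significant_physical_stop_loop_py (path_segments_list : List (String × String)) : Bool :=
  if path_segments_list.isEmpty || path_segments_list.length < 2 then false
  else
    match path_segments_list with
    | [] => false
    | p :: _ =>
      let visited := p.1 :: path_segments_list.map (fun seg => seg.2)
      hsA_loop visited (PySem.List.enumerate visited 0) PySem.Dict.empty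

-- ===== PORT B =====
-- 'for prev, cur in zip(visited_stops, visited_stops[1:]): …' with a seen-set
def hsB_loop : List (String × String) → PySem.Set String → Bool
  | [], _ => false
  | (prev, cur) :: rest, seen =>
    if cur != prev && PySem.Set.contains seen cur then true
    else hsB_loop rest (PySem.Set.add seen cur)

def has_significant_physical_stop_loop_py_alt (path_segments_list : List (String × String)) : Bool :=
  if path_segments_list.length < 2 then false
  else
    match path_segments_list with
    | [] => false
    | p :: _ =>
      let visited := p.1 :: path_segments_list.map (fun seg => seg.2)
      match visited with
      | [] => false
      | v0 :: _ =>
        hsB_loop (visited.zip (PySem.List.slice visited (some 1) none))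
          (PySem.Set.ofList [v0])

-- ===== PRECONDITION & SPEC =====
def Spec_has_significant_physical_stop_loop_py (path_segments_list : List (String × String)) (out : Bool) : Prop := out = has_significant_physical_stop_loop_py_alt path_segments_list
instance (path_segments_list : List (String × String)) (out : Bool) : Decidable (Spec_has_significant_physical_stop_loop_py path_segments_list out) := by unfold Spec_has_significant_physical_stop_loop_py; infer_instance

-- ===== CLAIM (what is proved, stated in full; the proofs are below) =====
def Claim_equal_has_significant_physical_stop_loop_py : Prop := ∀ (path_segments_list : List (String × String)), Dom_has_significant_physical_stop_loop_py path_segments_list → Spec_has_significant_physical_stop_loop_py path_segments_list (has_significant_physical_stop_loop_py path_segments_list)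

-- ===== LEMMAS AND PROOFS =====

-- Invariant of A's dict after processing the prefix `pre` of visited_stops:
-- each stop maps to the index of its LAST occurrence in `pre`.
def pvInv (dict : PySem.Dict String Int) (pre : List String) : Prop :=
  ∀ s : String,
    (dict.get? s = none ∧ s ∉ pre) ∨
    ∃ p : Nat, dict.get? s = some (p : Int) ∧ pre[p]? = some s ∧
      ∀ k : Nat, p < k → pre[k]? ≠ some s

lemma pvInv_insert {dict : PySem.Dict String Int} {pre : List String} (h : pvInv dict pre)
    (c : String) : pvInv (dict.insert c (pre.length : Int)) (pre ++ [c]) := by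
  intro s
  by_cases hsc : s = c
  · subst hsc
    refine Or.inr ⟨pre.length, ?_, ?_, ?_⟩
    · simp
    · simp
    · intro k hk
      have : (pre ++ [s]).length ≤ k := by simp; omega
      simp [List.getElem?_eq_none this]
  · rcases h s with ⟨h1, h2⟩ | ⟨p, h1, h2, h3⟩
    · refine Or.inl ⟨?_, ?_⟩
      · simpa [PySem.Dict.get?_insert, hsc] using h1
      · simp [hsc, h2]
    · have hp : p < pre.length := by
        by_contra hge
        simp [List.getElem?_eq_none (by omega : pre.length ≤ p)] at h2
      refine Or.inr ⟨p, ?_, ?_, ?_⟩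
      · simpa [PySem.Dict.get?_insert, hsc] using h1
      · rw [List.getElem?_append_left hp]; exact h2
      · intro k hk
        by_cases hkl : k < pre.length
        · rw [List.getElem?_append_left hkl]; exact h3 k hk
        · by_cases hkeq : k = pre.length
          · subst hkeq
            simp only [List.getElem?_concat_length]
            intro hcs
            exact hsc (by injection hcs with h'; exact h'.symm)
          · have : (pre ++ [c]).length ≤ k := by simp; omega
            simp [List.getElem?_eq_none this]

lemma pvMain (rest : List String) : ∀ (pre : List String) (dict : PySem.Dict String Int)
    (prevE : String), pre.getLast? = some prevE → pvInv dict pre →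
    hsA_loop (pre ++ rest) (PySem.List.enumerate rest (pre.length : Int)) dict
      = hsB_loop ((prevE :: rest).zip rest) (PySem.Set.ofList pre) := by
  induction rest with
  | nil => intro pre dict prevE _ _; simp [hsA_loop, hsB_loop, PySem.List.enumerate]
  | cons cur rest' ih =>
    intro pre dict prevE hlast hinv
    have hpre_ne : pre ≠ [] := by
      intro h; subst h; simp at hlast
    have hlastIdx : pre[pre.length - 1]? = some prevE := by
      rw [← List.getLast?_eq_getElem?]; exact hlast
    have hlen1 : 1 ≤ pre.length := by
      cases pre with
      | nil => exact absurd rfl hpre_ne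
      | cons a t => simp
    have hofl : PySem.Set.ofList (pre ++ [cur]) = PySem.Set.add (PySem.Set.ofList pre) cur := by
      simp [PySem.Set.ofList_eq_foldl, List.foldl_append]
    have hreassoc : pre ++ cur :: rest' = (pre ++ [cur]) ++ rest' := by simp
    have hlen' : ((pre ++ [cur]).length : Int) = (pre.length : Int) + 1 := by simp
    have hrec : hsA_loop (pre ++ cur :: rest')
        (PySem.List.enumerate rest' ((pre.length : Int) + 1)) (dict.insert cur (pre.length : Int))
        = hsB_loop ((cur :: rest').zip rest') (PySem.Set.add (PySem.Set.ofList pre) cur) := by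
      rw [hreassoc, ← hofl, ← hlen']
      exact ih (pre ++ [cur]) _ cur (by simp) (pvInv_insert hinv cur)
    rw [PySem.List.enumerate_cons, List.zip_cons_cons]
    rcases hinv cur with ⟨h1, h2⟩ | ⟨p, h1, h2, h3⟩
    · -- cur not seen before: both sides skip and recurse
      have hmem : PySem.Set.contains (PySem.Set.ofList pre) cur = false := by
        simp [PySem.Set.contains, PySem.Set.mem_ofList, h2]
      have hA : hsA_loop (pre ++ cur :: rest')
          (((pre.length : Int), cur) :: PySem.List.enumerate rest' ((pre.length : Int) + 1)) dict
          = hsA_loop (pre ++ cur :: rest')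
            (PySem.List.enumerate rest' ((pre.length : Int) + 1))
            (dict.insert cur (pre.length : Int)) := by
        simp [hsA_loop, h1]
      have hB : hsB_loop ((prevE, cur) :: (cur :: rest').zip rest') (PySem.Set.ofList pre)
          = hsB_loop ((cur :: rest').zip rest') (PySem.Set.add (PySem.Set.ofList pre) cur) := by
        simp [hsB_loop, h2]
      rw [hA, hB]
      exact hrec
    · have hp : p < pre.length := by
        by_contra hge
        simp [List.getElem?_eq_none (by omega : pre.length ≤ p)] at h2
      have hcurmem : cur ∈ pre := List.mem_of_getElem? h2
      by_cases hce : cur = prevE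
      · -- cur repeats the immediately preceding stop: gap is 1, both sides skip
        subst hce
        have hpeq : p = pre.length - 1 := by
          by_contra hne
          exact h3 (pre.length - 1) (by omega) hlastIdx
        have hgap : ¬ ((pre.length : Int) - (p : Int) > 1) := by
          subst hpeq; omega
        have hA : hsA_loop (pre ++ cur :: rest')
            (((pre.length : Int), cur) :: PySem.List.enumerate rest' ((pre.length : Int) + 1)) dict
            = hsA_loop (pre ++ cur :: rest')
              (PySem.List.enumerate rest' ((pre.length : Int) + 1))
              (dict.insert cur (pre.length : Int)) := by
          simp [hsA_loop, h1, hgap]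
        have hB : hsB_loop ((cur, cur) :: (cur :: rest').zip rest') (PySem.Set.ofList pre)
            = hsB_loop ((cur :: rest').zip rest') (PySem.Set.add (PySem.Set.ofList pre) cur) := by
          simp [hsB_loop]
        rw [hA, hB]
        exact hrec
      · -- cur was last seen at p < len-1: the stop at p+1 differs, both sides return true
        have hpne : p ≠ pre.length - 1 := by
          intro h; subst h; rw [hlastIdx] at h2
          exact hce (by injection h2 with h'; exact h'.symm)
        have hp1 : p + 1 < pre.length := by omega
        have hgap : ((pre.length : Int) - (p : Int) > 1) := by omega
        have hinner : hsA_inner (pre ++ cur :: rest') cur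
            (PySem.List.pyRange ((p : Int) + 1) (pre.length : Int) 1) = true := by
          simp only [hsA_inner, List.any_eq_true]
          refine ⟨((p + 1 : Nat) : Int), ?_, ?_⟩
          · rw [PySem.List.mem_pyRange_one]; push_cast; omega
          · rw [PySem.List.pyGet?_natCast, List.getElem?_append_left hp1, bne_iff_ne]
            exact h3 (p + 1) (by omega)
        have hmem : PySem.Set.contains (PySem.Set.ofList pre) cur = true := by
          simp [PySem.Set.contains, PySem.Set.mem_ofList, hcurmem]
        have hA : hsA_loop (pre ++ cur :: rest')
            (((pre.length : Int), cur) :: PySem.List.enumerate rest' ((pre.length : Int) + 1)) dict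
            = true := by
          simp [hsA_loop, h1, hgap, hinner]
        have hB : hsB_loop ((prevE, cur) :: (cur :: rest').zip rest') (PySem.Set.ofList pre)
            = true := by
          simp [hsB_loop, bne_iff_ne, hce, hcurmem]
        rw [hA, hB]

-- ===== VERDICT (by name: the statement is the Claim_ definition above) =====
theorem has_significant_physical_stop_loop_py_spec : Claim_equal_has_significant_physical_stop_loop_py := by
  intro psl _
  unfold Spec_has_significant_physical_stop_loop_py
  unfold has_significant_physical_stop_loop_py has_significant_physical_stop_loop_py_alt
  by_cases h2 : psl.length < 2
  · simp [h2]
  · match psl with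
    | [] => simp at h2
    | p :: t =>
      simp only [List.isEmpty_cons, Bool.false_or, decide_eq_true_eq, if_neg h2]
      rw [PySem.List.slice_from_one]
      rw [PySem.List.enumerate_cons]
      have hstep : hsA_loop (p.1 :: (p :: t).map (fun seg => seg.2))
          ((0, p.1) :: PySem.List.enumerate ((p :: t).map (fun seg => seg.2)) (0 + 1))
          PySem.Dict.empty
          = hsA_loop (p.1 :: (p :: t).map (fun seg => seg.2))
            (PySem.List.enumerate ((p :: t).map (fun seg => seg.2)) 1)
            (PySem.Dict.empty.insert p.1 0) := by
        simp [hsA_loop, PySem.Dict.get?_empty]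
      rw [hstep]
      have hinv : pvInv (PySem.Dict.empty.insert p.1 (0 : Int)) [p.1] := by
        intro s
        by_cases hs : s = p.1
        · refine Or.inr ⟨0, ?_, ?_, ?_⟩
          · simp [hs]
          · simp [hs]
          · intro k hk
            have hlen : ([p.1] : List String).length ≤ k := by simp; omega
            simp [List.getElem?_eq_none hlen]
        · exact Or.inl ⟨by simp [PySem.Dict.get?_insert, hs], by simp [hs]⟩
      have := pvMain ((p :: t).map (fun seg => seg.2)) [p.1]
        (PySem.Dict.empty.insert p.1 (0 : Int)) p.1 (by simp) hinv
      simpa using this
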